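-- pv_equiv track=rewrite | github.com/zhudingsuifeng/Python | 2018/redAndGreen.py | RG
-- ===== SOURCE A (Python) =====
-- def RG(s):
--     res = []
--     for i in range(len(s)+1):
--         t = 0
--         for j in range(len(s)):
--             if j <= i and s[j] == 'G':
--                 t += 1
--             if j > i and s[j] == 'R':
--                 t += 1
--         res.append(t)
--     return min(res)
-- ===== SOURCE B (Python) =====
-- def RG(s):
--     if not s:
--         return 0
--     t = s.count('R') + (s[0] == 'G') - (s[0] == 'R')
--     best = t
--     for c in s[1:]:
--         t += (c == 'G') - (c == 'R')
--         if t < best: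
--             best = t
--     return best
-- ===== Notes on version B (the rewrite author's own statement) =====
-- stated objective: faster
-- what changed: B replaces A's O(n^2) rescan of the whole string for every split point by one O(n) incremental sweep: it starts from the cost of the first split (total R's adjusted by s[0]) and updates the cost in O(1) per character while tracking the running minimum.
import Mathlib
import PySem

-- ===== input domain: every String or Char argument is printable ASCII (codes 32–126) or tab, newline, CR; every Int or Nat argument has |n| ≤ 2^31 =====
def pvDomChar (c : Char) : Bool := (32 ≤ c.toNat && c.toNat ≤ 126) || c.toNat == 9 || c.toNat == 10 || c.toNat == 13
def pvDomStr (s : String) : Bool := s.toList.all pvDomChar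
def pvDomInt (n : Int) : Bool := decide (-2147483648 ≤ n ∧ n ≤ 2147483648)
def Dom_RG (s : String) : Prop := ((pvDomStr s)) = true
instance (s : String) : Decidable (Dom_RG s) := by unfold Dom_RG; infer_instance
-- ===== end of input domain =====

-- B replaces A's quadratic scan over all split points by one incremental left-to-right
-- sweep maintaining the cost of the current split (objective: faster, asymptotic).

-- ===== PORT A =====
-- literal port of A: for each i in range(len(s)+1) an inner pass over all j,
-- collecting the counts in res, then min(res). s[j] with 0 ≤ j < len(s) is
-- always in range, so pyGetD is exact here.
def RG (s : String) : Int :=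
  let l := s.toList
  let res := (PySem.List.pyRange 0 ((PySem.Str.len s) + 1) 1).map (fun i =>
    (PySem.List.pyRange 0 (PySem.Str.len s) 1).foldl (fun t j =>
      let t1 := if j ≤ i ∧ PySem.List.pyGetD l j ' ' = 'G' then t + 1 else t
      if i < j ∧ PySem.List.pyGetD l j ' ' = 'R' then t1 + 1 else t1) 0)
  (PySem.List.min? res (fun x => x)).getD 0  -- min(res); res has len(s)+1 ≥ 1 elements, so never none

-- ===== PORT B =====
-- literal port of B (Source B): empty check, initial cost from s.count('R') and s[0],
-- then one fold over s[1:] carrying (best, t).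
def RG_alt (s : String) : Int :=
  match s.toList with
  | [] => 0
  | c :: rest =>
    let t0 : Int := (PySem.Str.count s "R" : Int)
      + (if c = 'G' then 1 else 0) - (if c = 'R' then 1 else 0)
    (rest.foldl (fun (p : Int × Int) d =>
        let t := p.2 + (if d = 'G' then 1 else 0) - (if d = 'R' then 1 else 0)
        (if t < p.1 then t else p.1, t)) (t0, t0)).1

-- ===== PRECONDITION & SPEC =====
def Spec_RG (s : String) (out : Int) : Prop := out = RG_alt s
instance (s : String) (out : Int) : Decidable (Spec_RG s out) := by unfold Spec_RG; infer_instance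

-- ===== CLAIM (what is proved, stated in full; the proofs are below) =====
def Claim_equal_RG : Prop := ∀ (s : String), Dom_RG s → Spec_RG s (RG s)

-- ===== LEMMAS AND PROOFS =====

-- cost of the split after position k: G's in the first k chars + R's in the rest
def gfun (l : List Char) (k : Nat) : Int :=
  ((l.take k).count 'G' : Int) + ((l.drop k).count 'R' : Int)

theorem gfun_high (l : List Char) (k : Nat) (h : l.length ≤ k) :
    gfun l k = gfun l l.length := by
  simp [gfun, List.take_of_length_le h, List.drop_of_length_le h]

theorem count_go_singleton (c : Char) :
    ∀ (l : List Char) (fuel acc : Nat), l.length ≤ fuel →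
      PySem.Chars.count.go [c] fuel l acc = acc + l.count c := by
  intro l
  induction l with
  | nil => intro fuel acc _; cases fuel <;> simp [PySem.Chars.count.go]
  | cons d t ih =>
      intro fuel acc h
      cases fuel with
      | zero => simp at h
      | succ f =>
          by_cases hd : d = c
          · subst hd
            simp only [PySem.Chars.count.go, List.isPrefixOf, BEq.rfl, Bool.true_and,
              if_true, List.length_cons, List.length_nil, List.drop_succ_cons,
              List.drop_zero, List.count_cons_self]
            rw [ih f (acc + 1) (by simpa using h)]
            omega
          · have hcd : ¬ c = d := fun h => hd h.symm
            have hpre : ([c].isPrefixOf (d :: t)) = false := by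
              simp [List.isPrefixOf, hcd]
            have hb : (d == c) = false := beq_eq_false_iff_ne.mpr hd
            simp only [PySem.Chars.count.go, hpre, Bool.false_eq_true, if_false,
              List.count_cons, hb]
            rw [ih f acc (by simpa using h)]
            omega

theorem str_count_single (s : String) : PySem.Str.count s "R" = s.toList.count 'R' := by
  rw [PySem.Str.count_eq]
  show PySem.Chars.count s.toList ['R'] = _
  simp only [PySem.Chars.count, List.isEmpty]
  exact (count_go_singleton 'R' s.toList s.toList.length 0 le_rfl).trans (by omega)

theorem sumG (l : List Char) : ∀ (i : Int),
    ((PySem.List.pyRange 0 (l.length : Int) 1).map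
      (fun j => if j ≤ i ∧ PySem.List.pyGetD l j ' ' = 'G' then (1:Int) else 0)).sum
    = ((l.take (i+1).toNat).count 'G' : Int) := by
  induction l with
  | nil => intro i; simp [PySem.List.pyRange_one_eq_nil]
  | cons c t ih =>
      intro i
      rw [show ((c :: t).length : Int) = ((t.length + 1 : Nat) : Int) by simp,
        PySem.List.pyRange_zero_nat, List.range_succ_eq_map]
      simp only [List.map_cons, List.map_map, List.sum_cons]
      have hmap : ∀ k : Nat,
          ((fun j => if j ≤ i ∧ PySem.List.pyGetD (c :: t) j ' ' = 'G' then (1:Int) else 0) ∘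
            (fun k : Nat => (k : Int)) ∘ Nat.succ) k
          = ((fun j => if j ≤ i - 1 ∧ PySem.List.pyGetD t j ' ' = 'G' then (1:Int) else 0) ∘
            (fun k : Nat => (k : Int))) k := by
        intro k
        simp only [Function.comp, PySem.List.pyGetD_natCast]
        have h1 : ((k : Int) + 1 ≤ i) = ((k : Int) ≤ i - 1) := by
          simp only [eq_iff_iff]; omega
        simp [h1]
      rw [List.map_congr_left (fun k _ => hmap k), ← List.map_map, ← PySem.List.pyRange_zero_nat,
        ih (i - 1)]
      by_cases hi : 0 ≤ i
      · have h1 : (i + 1).toNat = i.toNat + 1 := by omega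
        have h2 : (i - 1 + 1).toNat = i.toNat := by omega
        simp only [h1, h2, List.take_succ_cons, List.count_cons, Nat.cast_zero,
          PySem.List.pyGetD_zero_cons]
        have h3 : ((0:Int) ≤ i ∧ c = 'G') = (c = 'G') := by simp [hi]
        simp only [h3]
        by_cases hc : c = 'G' <;> simp [hc] <;> push_cast <;> ring
      · have h1 : (i + 1).toNat = 0 := by omega
        have h2 : (i - 1 + 1).toNat = 0 := by omega
        have h3 : ¬ ((0:Int) ≤ i ∧ PySem.List.pyGetD (c :: t) ((0:Nat) : Int) ' ' = 'G') := by
          intro h; exact hi h.1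
        simp only [h1, h2, Nat.cast_zero] at h3 ⊢
        rw [if_neg h3]
        simp

theorem sumR (l : List Char) : ∀ (i : Int),
    ((PySem.List.pyRange 0 (l.length : Int) 1).map
      (fun j => if i < j ∧ PySem.List.pyGetD l j ' ' = 'R' then (1:Int) else 0)).sum
    = ((l.drop (i+1).toNat).count 'R' : Int) := by
  induction l with
  | nil => intro i; simp [PySem.List.pyRange_one_eq_nil]
  | cons c t ih =>
      intro i
      rw [show ((c :: t).length : Int) = ((t.length + 1 : Nat) : Int) by simp,
        PySem.List.pyRange_zero_nat, List.range_succ_eq_map]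
      simp only [List.map_cons, List.map_map, List.sum_cons]
      have hmap : ∀ k : Nat,
          ((fun j => if i < j ∧ PySem.List.pyGetD (c :: t) j ' ' = 'R' then (1:Int) else 0) ∘
            (fun k : Nat => (k : Int)) ∘ Nat.succ) k
          = ((fun j => if i - 1 < j ∧ PySem.List.pyGetD t j ' ' = 'R' then (1:Int) else 0) ∘
            (fun k : Nat => (k : Int))) k := by
        intro k
        simp only [Function.comp, PySem.List.pyGetD_natCast]
        have h1 : (i < (k : Int) + 1) = (i - 1 < (k : Int)) := by
          simp only [eq_iff_iff]; omega
        simp [h1]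
      rw [List.map_congr_left (fun k _ => hmap k), ← List.map_map, ← PySem.List.pyRange_zero_nat,
        ih (i - 1)]
      by_cases hi : 0 ≤ i
      · have h1 : (i + 1).toNat = i.toNat + 1 := by omega
        have h2 : (i - 1 + 1).toNat = i.toNat := by omega
        have h3 : ¬ (i < ((0 : Nat) : Int) ∧ PySem.List.pyGetD (c :: t) ((0:Nat) : Int) ' ' = 'R') := by
          push_cast; intro h; omega
        simp only [h1, h2, Nat.cast_zero] at h3 ⊢
        rw [if_neg h3]
        simp [List.drop_succ_cons]
      · have h1 : (i + 1).toNat = 0 := by omega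
        have h2 : (i - 1 + 1).toNat = 0 := by omega
        simp only [h1, h2, List.drop_zero, Nat.cast_zero, PySem.List.pyGetD_zero_cons,
          List.count_cons]
        have h3 : (i < (0:Int) ∧ c = 'R') = (c = 'R') := by simp; omega
        simp only [h3]
        by_cases hc : c = 'R' <;> simp [hc] <;> push_cast <;> ring

-- A's inner loop computes the split cost at i
theorem inner_eq (l : List Char) (i : Int) :
    (PySem.List.pyRange 0 (l.length : Int) 1).foldl (fun t j =>
      let t1 := if j ≤ i ∧ PySem.List.pyGetD l j ' ' = 'G' then t + 1 else t
      if i < j ∧ PySem.List.pyGetD l j ' ' = 'R' then t1 + 1 else t1) 0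
    = gfun l (i+1).toNat := by
  have hstep : (fun (t : Int) (j : Int) =>
      let t1 := if j ≤ i ∧ PySem.List.pyGetD l j ' ' = 'G' then t + 1 else t
      if i < j ∧ PySem.List.pyGetD l j ' ' = 'R' then t1 + 1 else t1)
      = fun t j => t + ((if j ≤ i ∧ PySem.List.pyGetD l j ' ' = 'G' then (1:Int) else 0)
        + (if i < j ∧ PySem.List.pyGetD l j ' ' = 'R' then (1:Int) else 0)) := by
    funext t j; simp only []; split_ifs <;> ring
  rw [hstep, PySem.List.foldl_add, PySem.List.sum_map_add_int, sumG, sumR]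
  simp [gfun]

theorem foldl_min_le_init (xs : List Int) : ∀ b : Int, xs.foldl min b ≤ b := by
  induction xs with
  | nil => intro b; simp
  | cons x t ih => intro b; exact le_trans (ih (min b x)) (min_le_left _ _)

theorem foldl_min_le_mem {x : Int} {xs : List Int} (h : x ∈ xs) (b : Int) :
    xs.foldl min b ≤ x := by
  induction xs generalizing b with
  | nil => simp at h
  | cons y t ih =>
      rcases List.mem_cons.mp h with h | h
      · subst h; exact le_trans (foldl_min_le_init t (min b x)) (min_le_right _ _)
      · exact ih h (min b y)

-- A's value: the running minimum of gfun over all splits 1 .. len+1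
theorem A_char (s : String) :
    RG s = List.foldl min (gfun s.toList 1)
      ((List.range s.toList.length).map (fun k => gfun s.toList (k+2))) := by
  unfold RG
  simp only [PySem.Str.len_eq]
  rw [show ((s.toList.length : Int) + 1) = ((s.toList.length + 1 : Nat) : Int) by push_cast; ring,
    PySem.List.pyRange_zero_nat (s.toList.length + 1), List.map_map]
  have hmap : ∀ k ∈ List.range (s.toList.length + 1),
      ((fun i => (PySem.List.pyRange 0 (s.toList.length : Int) 1).foldl (fun t j =>
        let t1 := if j ≤ i ∧ PySem.List.pyGetD s.toList j ' ' = 'G' then t + 1 else t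
        if i < j ∧ PySem.List.pyGetD s.toList j ' ' = 'R' then t1 + 1 else t1) 0) ∘
        (fun k : Nat => (k : Int))) k = gfun s.toList (k+1) := by
    intro k _
    simp only [Function.comp_apply]
    rw [inner_eq]
    congr 1
  rw [List.map_congr_left hmap, List.range_succ_eq_map, List.map_cons, List.map_map,
    PySem.List.min?_id_cons, Option.getD_some]
  simp only [Nat.zero_add]
  congr 1

theorem gfun_step (pre : List Char) (c : Char) (rest : List Char) :
    gfun (pre ++ c :: rest) (pre.length + 1)
    = gfun (pre ++ c :: rest) pre.length
      + (if c = 'G' then 1 else 0) - (if c = 'R' then 1 else 0) := by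
  unfold gfun
  rw [List.take_append, List.drop_append, List.take_append, List.drop_append]
  simp only [Nat.add_sub_cancel_left, Nat.sub_self, List.take_of_length_le le_rfl,
    List.drop_of_length_le le_rfl, List.take_succ_cons, List.take_zero, List.drop_succ_cons,
    List.drop_zero, List.append_nil, List.count_append, List.count_cons, List.count_nil]
  have ht : List.take (pre.length + 1) pre = pre := List.take_of_length_le (by omega)
  have hd2 : List.drop (pre.length + 1) pre = [] := by
    apply List.drop_eq_nil_of_le; omega
  simp only [ht, hd2, List.count_nil]
  by_cases hG : c = 'G' <;> by_cases hR : c = 'R' <;>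
    simp [hG, hR, beq_iff_eq] <;> push_cast <;> ring

-- the invariant of B's fold: t tracks the current split cost, best the running minimum
theorem B_fold : ∀ (rest pre : List Char) (b : Int),
    (rest.foldl (fun (p : Int × Int) d =>
        let t := p.2 + (if d = 'G' then 1 else 0) - (if d = 'R' then 1 else 0)
        (if t < p.1 then t else p.1, t)) (b, gfun (pre ++ rest) pre.length)).1
    = (List.range rest.length).foldl
        (fun acc k => min acc (gfun (pre ++ rest) (pre.length + k + 1))) b := by
  intro rest
  induction rest with
  | nil => intro pre b; simp
  | cons d rest' ih =>
      intro pre b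
      simp only [List.foldl_cons]
      have ht : gfun (pre ++ d :: rest') pre.length
          + (if d = 'G' then 1 else 0) - (if d = 'R' then 1 else 0)
          = gfun ((pre ++ [d]) ++ rest') (pre ++ [d]).length := by
        rw [List.append_assoc]
        simp only [List.singleton_append, List.length_append, List.length_singleton]
        exact (gfun_step pre d rest').symm
      have hmin : ∀ t' : Int, (if t' < b then t' else b) = min b t' := by
        intro t'; rw [min_def]; split_ifs <;> omega
      simp only [ht, hmin]
      rw [ih (pre ++ [d]) (min b (gfun ((pre ++ [d]) ++ rest') (pre ++ [d]).length))]
      rw [show (d :: rest').length = rest'.length + 1 from rfl,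
        List.range_succ_eq_map, List.foldl_cons, List.foldl_map]
      simp only [List.append_assoc, List.singleton_append, List.length_append,
        List.length_singleton, Nat.succ_eq_add_one]
      congr 1
      funext acc k
      congr 2
      omega

theorem B_char (s : String) (c : Char) (rest : List Char) (h : s.toList = c :: rest) :
    RG_alt s = (List.range rest.length).foldl
      (fun acc k => min acc (gfun (c :: rest) (k + 2))) (gfun (c :: rest) 1) := by
  unfold RG_alt
  rw [h]
  have ht0 : (PySem.Str.count s "R" : Int)
      + (if c = 'G' then 1 else 0) - (if c = 'R' then 1 else 0) = gfun (c :: rest) 1 := by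
    rw [str_count_single, h]
    unfold gfun
    simp only [List.take_succ_cons, List.take_zero, List.drop_succ_cons, List.drop_zero,
      List.count_cons, List.count_nil]
    by_cases hG : c = 'G' <;> by_cases hR : c = 'R' <;>
      simp [hG, hR, beq_iff_eq] <;> push_cast <;> ring
  simp only [ht0]
  have := B_fold rest [c] (gfun (c :: rest) 1)
  simp only [List.singleton_append, List.length_singleton] at this
  rw [this]
  congr 1
  funext acc k
  congr 2
  omega

theorem RG_eq (s : String) : RG s = RG_alt s := by
  rcases hl : s.toList with _ | ⟨c, rest⟩
  · unfold RG RG_alt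
    rw [hl]
    rw [show (PySem.Str.len s : Int) = 0 by simp [PySem.Str.len_eq, hl]]
    rw [PySem.List.pyRange_one_eq_nil (le_refl (0:Int)), PySem.List.pyRange_one_singleton 0]
    simp [PySem.List.min?_id_cons]
  · rw [A_char s, B_char s c rest hl, hl]
    -- A folds over range (rest.length + 1); its extra last element gfun (n+1) = gfun n is redundant
    rw [show (c :: rest).length = rest.length + 1 from rfl, List.range_succ, List.map_append,
      List.map_singleton, List.foldl_append, List.foldl_cons, List.foldl_nil]
    have hlast : gfun (c :: rest) (rest.length + 2) = gfun (c :: rest) (rest.length + 1) := by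
      rw [gfun_high _ _ (by simp), gfun_high _ _ (by simp)]
      simp
    rw [hlast]
    have hmfold : List.foldl min (gfun (c :: rest) 1)
        ((List.range rest.length).map (fun k => gfun (c :: rest) (k+2)))
        = (List.range rest.length).foldl
            (fun acc k => min acc (gfun (c :: rest) (k + 2))) (gfun (c :: rest) 1) := by
      rw [List.foldl_map]
    rcases Nat.eq_zero_or_pos rest.length with hn | hn
    · simp only [hn]
      simp [show gfun (c :: rest) 1 = gfun (c :: rest) (0 + 1) from rfl]
    · have hmem : gfun (c :: rest) (rest.length + 1)
          ∈ (List.range rest.length).map (fun k => gfun (c :: rest) (k+2)) := by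
        refine List.mem_map.mpr ⟨rest.length - 1, List.mem_range.mpr (by omega), ?_⟩
        congr 1
        omega
      have hle := foldl_min_le_mem hmem (gfun (c :: rest) 1)
      rw [hmfold] at *
      rw [← hmfold] at hle ⊢
      rw [min_eq_left hle, hmfold]

-- ===== VERDICT (by name: the statement is the Claim_ definition above) =====
theorem RG_spec : Claim_equal_RG := by
  intro s _
  unfold Spec_RG
  exact RG_eq s
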